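-- pv_equiv track=rewrite | github.com/khp76431/blpapi | data_provider_base.py | _get_batch_indices
-- ===== SOURCE A (Python) =====
-- def _get_batch_indices(securities, batch_size):
--     if batch_size is None:
--         stt_idx = [0]
--         end_idx = [len(securities)]
--     else:
--         _num = int((len(securities)-1)/batch_size)
--         stt_idx = [batch_size * r for r in range(_num+1)]
--         end_idx = [x+batch_size for x in stt_idx[:-1]] + [len(securities)]
--     #
--     return stt_idx, end_idx
-- ===== SOURCE B (Python) =====
-- def _get_batch_indices(securities, batch_size):
--     # Ends-first: scan the securities once, marking each position that closes a
--     # batch (every batch_size-th element, and the final one); starts are the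
--     # ends shifted right with a leading 0.  No batch-count division anywhere.
--     n = len(securities)
--     if batch_size is None:
--         return [0], [n]
--     end_idx = [i + 1 for i, _ in enumerate(securities)
--                if (i + 1) % batch_size == 0 or i + 1 == n]
--     if not end_idx:
--         end_idx = [0]
--     return [0] + end_idx[:-1], end_idx
-- ===== Notes on version B (the rewrite author's own statement) =====
-- stated objective: alternative
-- what changed: B never computes a batch count: it scans the securities themselves once, collecting the end index of every batch (each position divisible by batch_size, plus the final position) with a modulus test, and then derives the start list by shifting the end list right behind a leading 0 - ends-first single data pass instead of A's division-derived count, arithmetic start comprehension and shifted-slice ends.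
-- intended difference: On empty securities with batch_size 1 A's truncating division gives -1 batches so A returns mismatched lists ([], [0]), while B returns the single empty batch ([0], [0]) - the same value A itself returns for every other batch size on an empty list, so B's is the intended at-least-one-batch output. — e.g. on _get_batch_indices([], some 1): A returns ([], [0]), B returns ([0], [0])
-- outside the precondition, e.g. on _get_batch_indices([1, 2, 3], 0): A raises ZeroDivisionError, B raises ZeroDivisionError; on _get_batch_indices([1, 2, 3], -2): A returns ([], [3]), B returns ([0, 2], [2, 3])
import Mathlib
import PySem

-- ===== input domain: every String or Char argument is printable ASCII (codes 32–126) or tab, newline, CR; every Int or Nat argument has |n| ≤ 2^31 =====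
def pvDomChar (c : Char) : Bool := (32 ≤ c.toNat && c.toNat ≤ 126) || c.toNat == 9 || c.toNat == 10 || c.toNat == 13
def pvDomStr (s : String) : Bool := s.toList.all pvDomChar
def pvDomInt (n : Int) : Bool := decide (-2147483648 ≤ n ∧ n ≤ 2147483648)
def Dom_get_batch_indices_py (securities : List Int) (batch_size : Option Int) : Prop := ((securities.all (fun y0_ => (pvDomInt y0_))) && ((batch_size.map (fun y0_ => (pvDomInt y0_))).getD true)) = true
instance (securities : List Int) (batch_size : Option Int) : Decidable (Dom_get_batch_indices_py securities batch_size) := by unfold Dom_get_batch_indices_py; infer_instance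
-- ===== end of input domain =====

-- B builds the END list first with one modulus-marking scan over the securities themselves and
-- derives the start list by shifting it, instead of A's batch-count division plus arithmetic
-- comprehension for starts and shifted-slice ends; equivalence is about return values only.

-- ===== PORT A =====
-- int((len(securities)-1)/batch_size): float true division then int() truncates toward zero;
-- exact for the magnitudes Dom admits, ported as Int.tdiv.
def get_batch_indices_py (securities : List Int) (batch_size : Option Int) : List Int × List Int :=
  match batch_size with
  | none => ([0], [(securities.length : Int)])
  | some bs =>
    let num := Int.tdiv ((securities.length : Int) - 1) bs
    let stt_idx := (PySem.List.pyRange 0 (num + 1) 1).map (fun r => bs * r)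
    let end_idx := (PySem.List.slice stt_idx none (some (-1))).map (fun x => x + bs)
                     ++ [(securities.length : Int)]
    (stt_idx, end_idx)

-- ===== PORT B =====
def get_batch_indices_py_alt (securities : List Int) (batch_size : Option Int) : List Int × List Int :=
  let n : Int := securities.length
  match batch_size with
  | none => ([0], [n])
  | some bs =>
    let end_idx0 :=
      ((PySem.List.enumerate securities).filter
          (fun p => PySem.Int.mod (p.1 + 1) bs == 0 || p.1 + 1 == n)).map (fun p => p.1 + 1)
    let end_idx := if end_idx0 = [] then [0] else end_idx0
    (0 :: PySem.List.slice end_idx none (some (-1)), end_idx)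

-- ===== PRECONDITION & SPEC =====
-- Pre_ restricts to the natural domain: a given batch size must be positive. A raises
-- ZeroDivisionError on batch_size 0 (so does B's modulus test), and on negative batch sizes
-- A's truncating division produces meaningless index lists (e.g. ([], [3])) nobody would specify.
def Pre_get_batch_indices_py (securities : List Int) (batch_size : Option Int) : Prop :=
  0 < batch_size.getD 1
instance (securities : List Int) (batch_size : Option Int) : Decidable (Pre_get_batch_indices_py securities batch_size) := by unfold Pre_get_batch_indices_py; infer_instance

def pvWitness_get_batch_indices_py : List Int × Option Int := ([1, 2, 3, 4, 5], some 2)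

-- On empty securities with batch_size 1 A's truncating division gives -1 batches so A returns
-- mismatched lists ([], [0]), while B returns the single empty batch ([0], [0]) — the value A
-- itself returns for every other batch size on an empty list; B's is the intended output.
def D_get_batch_indices_py (securities : List Int) (batch_size : Option Int) : Prop :=
  securities = [] ∧ batch_size = some 1
instance (securities : List Int) (batch_size : Option Int) : Decidable (D_get_batch_indices_py securities batch_size) := by unfold D_get_batch_indices_py; infer_instance

def Spec_get_batch_indices_py (securities : List Int) (batch_size : Option Int) (out : List Int × List Int) : Prop := ¬ D_get_batch_indices_py securities batch_size → out = get_batch_indices_py_alt securities batch_size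
instance (securities : List Int) (batch_size : Option Int) (out : List Int × List Int) : Decidable (Spec_get_batch_indices_py securities batch_size out) := by unfold Spec_get_batch_indices_py; infer_instance

def pvDiffWitness_get_batch_indices_py : List Int × Option Int := ([], some 1)
def pvDiffWitnessOut_get_batch_indices_py : (List Int × List Int) × (List Int × List Int) :=
  (([], [0]), ([0], [0]))

-- ===== CLAIM (what is proved, stated in full; the proofs are below) =====
def Claim_unchanged_get_batch_indices_py : Prop := ∀ (securities : List Int) (batch_size : Option Int), Dom_get_batch_indices_py securities batch_size → Pre_get_batch_indices_py securities batch_size → Spec_get_batch_indices_py securities batch_size (get_batch_indices_py securities batch_size)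
def Claim_changed_get_batch_indices_py : Prop := Dom_get_batch_indices_py (pvDiffWitness_get_batch_indices_py.1) (pvDiffWitness_get_batch_indices_py.2) ∧ Pre_get_batch_indices_py (pvDiffWitness_get_batch_indices_py.1) (pvDiffWitness_get_batch_indices_py.2) ∧ D_get_batch_indices_py (pvDiffWitness_get_batch_indices_py.1) (pvDiffWitness_get_batch_indices_py.2) ∧ get_batch_indices_py (pvDiffWitness_get_batch_indices_py.1) (pvDiffWitness_get_batch_indices_py.2) = pvDiffWitnessOut_get_batch_indices_py.1 ∧ get_batch_indices_py_alt (pvDiffWitness_get_batch_indices_py.1) (pvDiffWitness_get_batch_indices_py.2) = pvDiffWitnessOut_get_batch_indices_py.2 ∧ pvDiffWitnessOut_get_batch_indices_py.1 ≠ pvDiffWitnessOut_get_batch_indices_py.2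
def Claim_exact_get_batch_indices_py : Prop := ∀ (securities : List Int) (batch_size : Option Int), Dom_get_batch_indices_py securities batch_size → Pre_get_batch_indices_py securities batch_size → D_get_batch_indices_py securities batch_size → get_batch_indices_py securities batch_size ≠ get_batch_indices_py_alt securities batch_size

-- ===== LEMMAS AND PROOFS =====

-- The multiples of b among 1..m, in order, as range-filter on the index side.
lemma pv_multiples (b : Int) (hb : 0 < b) (m : Nat) :
    ((List.range m).filter (fun k : Nat => PySem.Int.mod ((k : Int) + 1) b == 0)).map (fun k : Nat => (k : Int) + 1)
      = (List.range (m / b.toNat)).map (fun j : Nat => b * ((j : Int) + 1)) := by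
  induction m with
  | zero => simp
  | succ m ih =>
    have hB : 0 < b.toNat := by omega
    have hbt : (b.toNat : Int) = b := by omega
    rw [List.range_succ, List.filter_append, List.map_append, ih, Nat.succ_div]
    have hdvd_iff : b.toNat ∣ m + 1 ↔ b ∣ ((m : Int) + 1) := by
      rw [← hbt]
      constructor
      · intro h; exact_mod_cast Int.natCast_dvd_natCast.mpr h
      · intro h
        apply Int.natCast_dvd_natCast.mp
        push_cast
        exact h
    by_cases hd : b.toNat ∣ m + 1
    · have hmod : PySem.Int.mod ((m : Int) + 1) b = 0 :=
        (PySem.Int.mod_eq_zero_iff_dvd _ _).mpr (hdvd_iff.mp hd)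
      have hval : b * (((m / b.toNat : Nat) : Int) + 1) = (m : Int) + 1 := by
        obtain ⟨c, hc⟩ := hd
        have hc0 : 0 < c := by
          rcases Nat.eq_zero_or_pos c with h | h
          · rw [h, Nat.mul_zero] at hc; omega
          · exact h
        have hdivm : m / b.toNat = c - 1 := by
          have hm : m = b.toNat * (c - 1) + (b.toNat - 1) := by
            have h1 : b.toNat * c = b.toNat * (c - 1) + b.toNat := by
              have : c = (c - 1) + 1 := by omega
              rw [this, Nat.mul_add, Nat.mul_one, Nat.add_sub_cancel]
            omega
          rw [hm, Nat.mul_add_div hB, Nat.div_eq_of_lt (by omega), Nat.add_zero]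
        rw [hdivm]
        have h1 : ((c - 1 : Nat) : Int) = (c : Int) - 1 := by omega
        rw [h1]
        have h2 : (m : Int) + 1 = b * c := by
          rw [← hbt]; exact_mod_cast congrArg (Nat.cast (R := Int)) hc
        rw [h2]; ring
      rw [if_pos hd, List.range_succ, List.map_append]
      have hfil : ([m].filter (fun k : Nat => PySem.Int.mod ((k : Int) + 1) b == 0)) = [m] := by
        simp [hmod]
      rw [hfil, List.map_cons, List.map_nil, List.map_cons, List.map_nil, hval]
    · have hmod : ¬ PySem.Int.mod ((m : Int) + 1) b = 0 := fun h =>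
        hd (hdvd_iff.mpr ((PySem.Int.mod_eq_zero_iff_dvd _ _).mp h))
      have hfil : ([m].filter (fun k : Nat => PySem.Int.mod ((k : Int) + 1) b == 0)) = [] := by
        simp [hmod]
      rw [if_neg hd, hfil, List.map_nil, List.append_nil, Nat.add_zero]

-- Core agreement on a given positive batch size, outside the D_ corner.
lemma pv_main : ∀ (securities : List Int) (b : Int), 0 < b → ¬ (securities = [] ∧ b = 1) →
    get_batch_indices_py securities (some b) = get_batch_indices_py_alt securities (some b) := by
  intro sec b hb hnd
  have hbt : (b.toNat : Int) = b := by omega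
  rcases Nat.eq_zero_or_pos sec.length with hN | hN
  · -- empty securities, b ≠ 1
    have hnil : sec = [] := List.length_eq_zero_iff.mp hN
    subst hnil
    have hb1 : b ≠ 1 := fun h => hnd ⟨rfl, h⟩
    have htd : Int.tdiv ((([] : List Int).length : Int) - 1) b = 0 := by
      show Int.tdiv (0 - 1) b = 0
      have h0 : (0 : Int) - 1 = -1 := by ring
      rw [h0, Int.neg_tdiv, Int.tdiv_eq_zero_of_lt (by omega) (by omega)]
      ring
    have hpr : PySem.List.pyRange 0 (0 + 1) 1 = [0] := by decide
    unfold get_batch_indices_py get_batch_indices_py_alt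
    simp only [htd, PySem.List.enumerate_nil, List.filter_nil, List.map_nil, hpr,
      List.map_cons, List.map_nil, mul_zero, PySem.List.slice_to_neg_one, List.dropLast_singleton]
    simp
  · -- at least one element
    obtain ⟨N, hNdef⟩ : ∃ n, sec.length = n := ⟨_, rfl⟩
    rw [hNdef] at hN
    have hn : (sec.length : Int) = (N : Int) := by rw [hNdef]
    obtain ⟨M, rfl⟩ : ∃ m, N = m + 1 := ⟨N - 1, by omega⟩
    obtain ⟨Q, hQdef⟩ : ∃ q, M / b.toNat = q := ⟨_, rfl⟩
    have hnum : Int.tdiv ((sec.length : Int) - 1) b = (Q : Int) := by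
      rw [hn, Int.tdiv_eq_ediv_of_nonneg (by omega)]
      have h1 : ((M + 1 : Nat) : Int) - 1 = ((M : Nat) : Int) := by omega
      rw [h1, ← hbt, ← Int.natCast_ediv, hQdef]
    -- canonical ends list
    have hE : ((PySem.List.enumerate sec).filter
          (fun p => PySem.Int.mod (p.1 + 1) b == 0 || p.1 + 1 == (sec.length : Int))).map (fun p => p.1 + 1)
        = (List.range Q).map (fun j : Nat => b * ((j : Int) + 1)) ++ [((M + 1 : Nat) : Int)] := by
      rw [PySem.List.enumerate_eq_map_pyRange sec 0, List.filter_map, List.map_map]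
      rw [PySem.List.len_eq, hn, PySem.List.pyRange_one, List.filter_map, List.map_map]
      simp only [Function.comp_def, sub_zero, Int.toNat_natCast, zero_add]
      rw [List.range_succ, List.filter_append, List.map_append]
      have h1 : (List.range M).filter
            (fun k : Nat => PySem.Int.mod ((k : Int) + 1) b == 0 || (k : Int) + 1 == (((M + 1 : Nat) : Int))) =
          (List.range M).filter (fun k : Nat => PySem.Int.mod ((k : Int) + 1) b == 0) := by
        apply List.filter_congr
        intro k hk
        have hk' : k < M := List.mem_range.mp hk
        have hne : ((k : Int) + 1 == (((M + 1 : Nat) : Int))) = false := by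
          simp only [beq_eq_false_iff_ne, ne_eq]
          push_cast
          omega
        rw [hne, Bool.or_false]
      have h2 : ([M].filter
            (fun k : Nat => PySem.Int.mod ((k : Int) + 1) b == 0 || (k : Int) + 1 == (((M + 1 : Nat) : Int)))) = [M] := by
        simp only [List.filter_cons, List.filter_nil]
        have ht : (((M : Nat) : Int) + 1 == (((M + 1 : Nat) : Int))) = true := by
          simp only [beq_iff_eq]; push_cast; ring
        rw [ht]
        simp
      rw [h1, h2, pv_multiples b hb, hQdef, List.map_cons, List.map_nil]
      congr 2
    -- now the two sides
    unfold get_batch_indices_py get_batch_indices_py_alt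
    simp only [hnum, hE]
    have hne : (List.range Q).map (fun j : Nat => b * ((j : Int) + 1)) ++ [((M + 1 : Nat) : Int)] ≠ [] := by
      simp
    rw [if_neg hne]
    have hstt : (PySem.List.pyRange 0 ((Q : Int) + 1) 1).map (fun r => b * r)
        = (List.range (Q + 1)).map (fun k : Nat => b * (k : Int)) := by
      rw [PySem.List.pyRange_one]
      have h3 : ((Q : Int) + 1 - 0).toNat = Q + 1 := by omega
      rw [h3, List.map_map]
      simp [Function.comp_def]
    refine Prod.ext ?_ ?_
    · -- starts
      show (PySem.List.pyRange 0 ((Q : Int) + 1) 1).map (fun r => b * r)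
          = 0 :: PySem.List.slice ((List.range Q).map (fun j : Nat => b * ((j : Int) + 1)) ++ [((M + 1 : Nat) : Int)]) none (some (-1))
      rw [PySem.List.slice_to_neg_one, List.dropLast_concat, hstt, List.range_succ_eq_map,
        List.map_cons, List.map_map]
      refine List.cons_eq_cons.mpr ⟨by simp, ?_⟩
      apply List.map_congr_left
      intro k _
      simp only [Function.comp_def, Nat.succ_eq_add_one]
      push_cast
      ring
    · -- ends
      show (PySem.List.slice ((PySem.List.pyRange 0 ((Q : Int) + 1) 1).map (fun r => b * r)) none (some (-1))).map (fun x => x + b)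
            ++ [(sec.length : Int)] = (List.range Q).map (fun j : Nat => b * ((j : Int) + 1)) ++ [((M + 1 : Nat) : Int)]
      rw [hstt, PySem.List.slice_to_neg_one, List.range_succ, List.map_append, List.map_cons,
        List.map_nil, List.dropLast_concat, List.map_map, hn]
      refine congrArg₂ (· ++ ·) ?_ rfl
      apply List.map_congr_left
      intro k _
      simp only [Function.comp_def]
      ring

-- ===== VERDICT (by name: the statement is the Claim_ definition above) =====
theorem get_batch_indices_py_spec : Claim_unchanged_get_batch_indices_py := by
  intro securities batch_size _ hpre hnd
  match batch_size with
  | none => rfl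
  | some b =>
    show get_batch_indices_py securities (some b) = get_batch_indices_py_alt securities (some b)
    exact pv_main securities b hpre (fun h => hnd ⟨h.1, by rw [h.2]⟩)

theorem get_batch_indices_py_changed : Claim_changed_get_batch_indices_py := by
  unfold Claim_changed_get_batch_indices_py; decide
theorem get_batch_indices_py_tight : Claim_exact_get_batch_indices_py := by
  intro securities batch_size _ _ hd
  obtain ⟨hs, hb⟩ := hd
  subst hs; subst hb; decide
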